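-- pv_equiv track=rewrite | github.com/rickformorty/Verilog_module_drawing | module_draw.py | read_module_content_for_one
-- ===== SOURCE A (Python) =====
-- def read_module_content_for_one(lines):
--     module_content = []  # 用于存储模块定义内的内容
--     module_start = False  # 标记是否已经进入了模块定义
--
--     # 遍历文件的每一行
--     for line in lines:
--         line = line.strip()  # 去除首尾空白字符
--
--         # 如果已经进入了模块定义
--         if module_start:
--             # 如果当前行为空或者以注释符号开头，则跳过
--             if not line or line.startswith('//'):
--                 continue
--             # 如果遇到模块定义结束的符号，则停止解析
--             elif line == ');':
--                 module_content.append(line)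
--                 break
--             # 否则将当前行添加到模块内容中
--             else:
--                 module_content.append(line)
--         # 如果还没有进入模块定义，检查当前行是否包含模块定义的开始符号
--         elif line.startswith('module'):
--             module_start = True
--             module_content.append(line)
--
--     return module_content
-- ===== SOURCE B (Python) =====
-- def read_module_content_for_one(lines):
--     stripped = [l.strip() for l in lines]
--     # locate the first module header line
--     start = next((i for i, s in enumerate(stripped) if s.startswith('module')), None)
--     if start is None:
--         return []
--     out = [stripped[start]]
--     for s in stripped[start + 1:]:
--         if not s or s.startswith('//'):
--             continue
--         out.append(s)
--         if s == ');':
--             break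
--     return out
-- ===== Notes on version B (the rewrite author's own statement) =====
-- stated objective: alternative
-- what changed: Replaced the flag-driven single loop with a two-phase locate-then-collect: first find the index of the first stripped line starting with 'module' (next/enumerate), then collect from there, breaking after ');'.
import Mathlib
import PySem

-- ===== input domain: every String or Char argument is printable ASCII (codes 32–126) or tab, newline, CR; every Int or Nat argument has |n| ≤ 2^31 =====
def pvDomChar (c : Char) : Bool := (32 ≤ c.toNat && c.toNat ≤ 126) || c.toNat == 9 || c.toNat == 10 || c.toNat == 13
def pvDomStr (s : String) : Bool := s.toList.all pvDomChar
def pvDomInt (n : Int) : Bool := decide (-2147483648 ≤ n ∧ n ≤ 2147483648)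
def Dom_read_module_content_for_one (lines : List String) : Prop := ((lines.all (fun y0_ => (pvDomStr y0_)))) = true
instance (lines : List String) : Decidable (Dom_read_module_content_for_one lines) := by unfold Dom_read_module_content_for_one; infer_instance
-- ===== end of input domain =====

-- B replaces A's flag-driven single loop with a locate-then-collect two-phase structure; objective: alternative decomposition (same cost).

-- ===== PORT A =====
-- A's for-loop with the `module_start` flag, the accumulator `module_content` and `break`, as recursion over the lines
def pvALoop : List String → List String → Bool → List String
  | [], acc, _ => acc
  | l :: rest, acc, started =>
    let line := PySem.Str.strip l
    if started then
      if line = "" || PySem.Str.startswith line "//" then pvALoop rest acc started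
      else if line = ");" then acc ++ [line]          -- append then break
      else pvALoop rest (acc ++ [line]) started
    else if PySem.Str.startswith line "module" then pvALoop rest (acc ++ [line]) true
    else pvALoop rest acc started

def read_module_content_for_one (lines : List String) : List String :=
  pvALoop lines [] false

-- ===== PORT B =====
-- phase 1: locate the first stripped line starting with 'module', returning it and the remaining stripped lines
def pvBLocate : List String → Option (String × List String)
  | [] => none
  | s :: rest => if PySem.Str.startswith s "module" then some (s, rest) else pvBLocate rest

-- phase 2: collect body lines, skipping blanks/comments, stopping after ');'
def pvBCollect : List String → List String
  | [] => []
  | s :: rest =>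
    if s = "" || PySem.Str.startswith s "//" then pvBCollect rest
    else if s = ");" then [s]
    else s :: pvBCollect rest

def read_module_content_for_one_alt (lines : List String) : List String :=
  let stripped := lines.map PySem.Str.strip
  match pvBLocate stripped with
  | none => []
  | some (hd, rest) => hd :: pvBCollect rest

-- ===== PRECONDITION & SPEC =====
def Spec_read_module_content_for_one (lines : List String) (out : List String) : Prop := out = read_module_content_for_one_alt lines
instance (lines : List String) (out : List String) : Decidable (Spec_read_module_content_for_one lines out) := by unfold Spec_read_module_content_for_one; infer_instance

-- ===== CLAIM (what is proved, stated in full; the proofs are below) =====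
def Claim_equal_read_module_content_for_one : Prop := ∀ (lines : List String), Dom_read_module_content_for_one lines → Spec_read_module_content_for_one lines (read_module_content_for_one lines)

-- ===== LEMMAS AND PROOFS =====
theorem pvALoop_started (rest acc) : pvALoop rest acc true = acc ++ pvBCollect (rest.map PySem.Str.strip) := by
  induction rest generalizing acc with
  | nil => simp [pvALoop, pvBCollect]
  | cons l t ih =>
    simp only [pvALoop, pvBCollect, List.map_cons]
    split_ifs <;> simp [ih]

theorem pvALoop_unstarted (lines acc) : pvALoop lines acc false =
    acc ++ (match pvBLocate (lines.map PySem.Str.strip) with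
            | none => []
            | some (hd, rest) => hd :: pvBCollect rest) := by
  induction lines generalizing acc with
  | nil => simp [pvALoop, pvBLocate]
  | cons l t ih =>
    by_cases h : PySem.Chars.startswith (PySem.Chars.strip l.toList) ['m','o','d','u','l','e'] = true
    · simp [pvALoop, pvBLocate, List.map_cons, h, pvALoop_started]
    · simp [pvALoop, pvBLocate, List.map_cons, h, ih]

-- ===== VERDICT (by name: the statement is the Claim_ definition above) =====
theorem read_module_content_for_one_spec : Claim_equal_read_module_content_for_one := by
  intro lines _
  show _ = _
  rw [read_module_content_for_one, read_module_content_for_one_alt, pvALoop_unstarted]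
  simp
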